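-- pv_equiv track=rewrite | github.com/zdelrosario/pyutil | pyutil/numeric/util.py | multi_index
-- ===== SOURCE A (Python) =====
-- import copy
--
-- def multi_index(N):
--     """Generates list of elements in a multi-index
--     Usage
--         K = multi_index(N)
--     Arguments
--         N = list of elements per dimension;
--             length is number of dimensions
--     Returns
--         K = list of multi-index values
--     """
--     d = len(N)
--     # Seed with first element
--     res = [[0] * d]
--     # Loop over every dimension
--     for i in range(d):
--         # Create buffer for added rows
--         add_on = []
--         # Loop over every existing row, skip first
--         for j in range(len(res)):
--             # Loop over every possible value
--             for k in range(N[i]):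
--                 temp = copy.copy(res[j]); temp[i] = k
--                 add_on.append(temp)
--         # Replace with buffer
--         res = add_on
--     return res
-- ===== SOURCE B (Python) =====
-- def multi_index(N):
--     """Generates list of elements in a multi-index by mixed-radix
--     decomposition of the linear index (last dimension fastest)."""
--     total = 1
--     for n in N:
--         if n <= 0:
--             return []
--         total *= n
--     out = []
--     for idx in range(total):
--         row = []
--         n = idx
--         for Ni in reversed(N):
--             n, digit = divmod(n, Ni)
--             row = [digit] + row
--         out.append(row)
--     return out
-- ===== Notes on version B (the rewrite author's own statement) =====
-- stated objective: alternative
-- what changed: Replaces A's dimension-by-dimension rebuilding of the whole result buffer with a direct mixed-radix decomposition: each row is computed independently from its linear index by repeated divmod over the dimension sizes (last dimension fastest), with an early empty return when any dimension size is nonpositive.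
import Mathlib
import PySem

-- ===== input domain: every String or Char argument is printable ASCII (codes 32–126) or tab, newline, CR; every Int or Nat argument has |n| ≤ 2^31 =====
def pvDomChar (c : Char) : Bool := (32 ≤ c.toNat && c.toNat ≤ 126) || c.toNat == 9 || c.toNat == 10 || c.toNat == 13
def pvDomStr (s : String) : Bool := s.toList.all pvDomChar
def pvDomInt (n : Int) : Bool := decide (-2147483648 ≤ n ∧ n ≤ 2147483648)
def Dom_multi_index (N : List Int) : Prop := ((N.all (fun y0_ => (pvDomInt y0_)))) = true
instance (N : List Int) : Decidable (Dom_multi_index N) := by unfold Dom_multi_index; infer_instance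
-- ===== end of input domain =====

-- B replaces A's dimension-by-dimension buffer rebuilding by a direct mixed-radix
-- decomposition of each linear index (objective: alternative decomposition, same output).

-- ===== PORT A =====
-- A: res = [[0]*d]; for i in range(d): add_on = []; for row in res: for k in range(N[i]):
--        temp = copy(row); temp[i] = k; add_on.append(temp); res = add_on
def multi_index (N : List Int) : List (List Int) :=
  (List.range N.length).foldl
    (fun res i =>
      res.foldl
        (fun add_on row =>
          (PySem.List.pyRange 0 (N.getD i 0)).foldl
            (fun add_on k => add_on ++ [row.set i k]) add_on)
        [])
    [List.replicate N.length 0]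

-- ===== PORT B =====
-- B: total = 1; for n in N: if n <= 0: return []; total *= n  (None = early return)
def pvTotal : Int → List Int → Option Int
  | acc, [] => some acc
  | acc, n :: rest => if n ≤ 0 then none else pvTotal (acc * n) rest

-- B: row = []; n = idx; for Ni in reversed(N): n, digit = divmod(n, Ni); row = [digit] + row
def pvRow (N : List Int) (idx : Int) : List Int :=
  (N.reverse.foldl
    (fun st Ni => (PySem.Int.floordiv st.1 Ni, PySem.Int.mod st.1 Ni :: st.2))
    (idx, ([] : List Int))).2

def multi_index_alt (N : List Int) : List (List Int) :=
  match pvTotal 1 N with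
  | none => []
  | some total =>
      (PySem.List.pyRange 0 total).foldl (fun out idx => out ++ [pvRow N idx]) []

-- ===== PRECONDITION & SPEC =====
def Spec_multi_index (N : List Int) (out : List (List Int)) : Prop := out = multi_index_alt N
instance (N : List Int) (out : List (List Int)) : Decidable (Spec_multi_index N out) := by unfold Spec_multi_index; infer_instance

-- ===== CLAIM (what is proved, stated in full; the proofs are below) =====
def Claim_equal_multi_index : Prop := ∀ (N : List Int), Dom_multi_index N → Spec_multi_index N (multi_index N)

-- ===== LEMMAS AND PROOFS =====

-- The canonical cartesian multi-index list, last dimension fastest.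
def pvCart : List Int → List (List Int)
  | [] => [[]]
  | n :: M => ((List.range n.toNat).map (fun (k : Nat) => (k : Int))).flatMap
                (fun k => (pvCart M).map (fun t => k :: t))

-- Overwriting a row position by position, starting at index i.
def pvOver (row : List Int) (i : Nat) : List Int → List Int
  | [] => row
  | t :: ts => pvOver (row.set i t) (i + 1) ts

theorem pvCart_length {M : List Int} {t : List Int} (h : t ∈ pvCart M) :
    t.length = M.length := by
  induction M generalizing t with
  | nil => simp [pvCart] at h; simp [h]
  | cons m M ih =>
      simp [pvCart] at h
      obtain ⟨k, -, t', ht', rfl⟩ := h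
      simp [ih ht']

theorem pvCart_nil_of_nonpos {M : List Int} (h : ∃ n ∈ M, n ≤ 0) : pvCart M = [] := by
  induction M with
  | nil => simp at h
  | cons m M ih =>
      rcases h with ⟨n, hn, hle⟩
      rcases List.mem_cons.mp hn with rfl | hn'
      · have : n.toNat = 0 := Int.toNat_of_nonpos hle
        simp [pvCart, this]
      · simp [pvCart, ih ⟨n, hn', hle⟩]

theorem pvOver_eq (pre t : List Int) :
    ∀ row : List Int, row.length = t.length → pvOver (pre ++ row) pre.length t = pre ++ t := by
  induction t generalizing pre with
  | nil => intro row h; simp at h; simp [pvOver, h]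
  | cons x ts ih =>
      intro row h
      cases row with
      | nil => simp at h
      | cons r rs =>
        simp only [pvOver]
        have hset : (pre ++ r :: rs).set pre.length x = (pre ++ [x]) ++ rs := by
          rw [List.set_append_right _ _ (le_refl _)]
          simp
        rw [hset]
        have := ih (pre ++ [x]) rs (by simpa using h)
        simpa using this

-- ---- Port A equals pvCart ----

theorem multi_index_core (N : List Int) :
    ∀ (M : List Int) (i0 : Nat) (rows : List (List Int)), N.drop i0 = M →
      (List.range' i0 M.length).foldl
        (fun res i =>
          res.foldl
            (fun add_on row =>
              (PySem.List.pyRange 0 (N.getD i 0)).foldl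
                (fun add_on k => add_on ++ [row.set i k]) add_on)
            []) rows
      = rows.flatMap (fun row => (pvCart M).map (fun t => pvOver row i0 t)) := by
  intro M
  induction M with
  | nil =>
      intro i0 rows _
      simp [pvCart, pvOver]
  | cons m M ih =>
      intro i0 rows hdrop
      have hget : N.getD i0 0 = m := by
        have h0 : (N.drop i0)[0]? = some m := by rw [hdrop]; rfl
        rw [List.getElem?_drop] at h0
        simp only [Nat.add_zero] at h0
        simp [List.getD, h0]
      have hm : PySem.List.pyRange 0 m = (List.range m.toNat).map (fun (k : Nat) => (k : Int)) := by
        by_cases h : m ≤ 0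
        · have : m.toNat = 0 := Int.toNat_of_nonpos h
          simp [this, PySem.List.pyRange, show ¬(0:Int) < m by omega]
        · push Not at h
          conv_lhs => rw [show m = ((m.toNat : Nat) : Int) by omega]
          exact PySem.List.pyRange_zero_natCast m.toNat
      have hstep : ∀ rows : List (List Int),
          rows.foldl
            (fun add_on row =>
              (PySem.List.pyRange 0 (N.getD i0 0)).foldl
                (fun add_on k => add_on ++ [row.set i0 k]) add_on)
            []
          = rows.flatMap (fun row =>
              ((List.range m.toNat).map (fun (k : Nat) => (k : Int))).map (fun k => row.set i0 k)) := by
        intro rows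
        rw [hget]
        have : ∀ (row : List Int) (acc : List (List Int)),
            (PySem.List.pyRange 0 m).foldl (fun add_on k => add_on ++ [row.set i0 k]) acc
            = acc ++ ((List.range m.toNat).map (fun (k : Nat) => (k : Int))).map (fun k => row.set i0 k) := by
          intro row acc
          rw [hm, PySem.List.foldl_append_singleton_eq_map]
        calc rows.foldl (fun add_on row =>
              (PySem.List.pyRange 0 m).foldl (fun add_on k => add_on ++ [row.set i0 k]) add_on) []
            = rows.foldl (fun add_on row =>
                add_on ++ ((List.range m.toNat).map (fun (k : Nat) => (k : Int))).map (fun k => row.set i0 k)) [] := by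
              exact PySem.List.foldl_congr_mem _ _ _ _ (fun acc x _ => this x acc)
          _ = _ := by rw [PySem.List.foldl_append_eq_flatMap]; simp
      have hdrop' : N.drop (i0 + 1) = M := by
        have := congrArg (List.drop 1) hdrop
        simpa [List.drop_drop, Nat.add_comm] using this
      rw [List.length_cons, List.range'_succ, List.foldl_cons, hstep, ih (i0 + 1) _ hdrop']
      rw [List.flatMap_assoc]
      apply List.flatMap_congr
      intro row _
      rw [List.flatMap_map]
      simp only [pvCart, List.map_flatMap, List.map_map]
      apply List.flatMap_congr
      intro k _
      apply List.map_congr_left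
      intro t _
      simp [pvOver]

theorem multi_index_eq_cart (N : List Int) : multi_index N = pvCart N := by
  have h := multi_index_core N N 0 [List.replicate N.length 0] (by simp)
  unfold multi_index
  rw [List.range_eq_range', h]
  simp only [List.flatMap_cons, List.flatMap_nil, List.append_nil]
  rw [List.map_congr_left, List.map_id]
  intro t ht
  have hlen : t.length = N.length := pvCart_length ht
  have := pvOver_eq [] t (List.replicate N.length 0) (by simp [hlen])
  simpa using this

-- ---- Port B equals pvCart ----

-- state of B's inner (reversed) loop
def pvSt (N : List Int) (idx : Int) : Int × List Int :=
  N.reverse.foldl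
    (fun st Ni => (PySem.Int.floordiv st.1 Ni, PySem.Int.mod st.1 Ni :: st.2))
    (idx, ([] : List Int))

theorem pvSt_cons (m : Int) (M : List Int) (idx : Int) :
    pvSt (m :: M) idx =
      (PySem.Int.floordiv (pvSt M idx).1 m, PySem.Int.mod (pvSt M idx).1 m :: (pvSt M idx).2) := by
  unfold pvSt
  rw [List.reverse_cons, List.foldl_append]
  rfl

theorem pvRow_eq_st (N : List Int) (idx : Int) : pvRow N idx = (pvSt N idx).2 := rfl

theorem pvSt_decomp : ∀ (M : List Int), (∀ n ∈ M, 0 < n) → ∀ (k r : Int), 0 ≤ r → r < M.prod →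
    pvSt M (k * M.prod + r) = (k, (pvSt M r).2) := by
  intro M
  induction M with
  | nil =>
      intro _ k r hr0 hr1
      simp at hr1
      have : r = 0 := by omega
      simp [pvSt, this]
  | cons m M ih =>
      intro hpos k r hr0 hr1
      have hm : 0 < m := hpos m (List.mem_cons_self ..)
      have hP : 0 < M.prod := List.prod_pos (fun n hn => hpos n (List.mem_cons_of_mem _ hn))
      set a := PySem.Int.floordiv r M.prod with ha
      set b := PySem.Int.mod r M.prod with hb
      have hb0 : 0 ≤ b := PySem.Int.mod_nonneg r hP
      have hb1 : b < M.prod := PySem.Int.mod_lt r hP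
      have hab : a * M.prod + b = r := PySem.Int.floordiv_mul_add_mod r M.prod
      have ha0 : 0 ≤ a := by
        by_contra h
        push Not at h
        nlinarith [hb1, hr0, hab]
      have ha1 : a < m := by
        by_contra h
        push Not at h
        have : m * M.prod ≤ a * M.prod := by nlinarith
        have := List.prod_cons (l := M) (a := m)
        nlinarith [hr1, hb0, hab, List.prod_cons (l := M) (a := m)]
      have hidx : k * (m :: M).prod + r = (k * m + a) * M.prod + b := by
        rw [List.prod_cons]; nlinarith [hab]
      have hidx2 : pvSt M (k * (m :: M).prod + r) = (k * m + a, (pvSt M b).2) := by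
        rw [hidx]
        exact ih (fun n hn => hpos n (List.mem_cons_of_mem _ hn)) _ b hb0 hb1
      have hr : pvSt M r = (a, (pvSt M b).2) := by
        conv_lhs => rw [← hab]
        exact ih (fun n hn => hpos n (List.mem_cons_of_mem _ hn)) a b hb0 hb1
      rw [pvSt_cons, pvSt_cons, hidx2, hr]
      have hq : PySem.Int.floordiv (k * m + a) m = k := by
        rw [PySem.Int.floordiv_eq_iff_of_pos hm]
        constructor <;> nlinarith
      have hq2 : PySem.Int.mod (k * m + a) m = a := by
        have := PySem.Int.floordiv_mul_add_mod (k * m + a) m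
        rw [hq] at this
        omega
      have hq3 : PySem.Int.floordiv a m = 0 := by
        rw [PySem.Int.floordiv_eq_iff_of_pos hm]
        constructor <;> nlinarith
      have hq4 : PySem.Int.mod a m = a := by
        have := PySem.Int.floordiv_mul_add_mod a m
        rw [hq3] at this
        omega
      rw [hq, hq2, hq3, hq4]

theorem pvRange_mul (a b : Nat) :
    List.range (a * b) = (List.range a).flatMap (fun k => (List.range b).map (fun r => k * b + r)) := by
  induction a with
  | zero => simp
  | succ a ih =>
      rw [Nat.succ_mul, List.range_add, ih, List.range_succ]
      simp [Nat.add_comm]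

theorem pvRows_eq_cart : ∀ (M : List Int), (∀ n ∈ M, 0 < n) →
    (List.range M.prod.toNat).map (fun (j : Nat) => (pvSt M ((j : Nat) : Int)).2) = pvCart M := by
  intro M
  induction M with
  | nil => intro _; simp [pvSt, pvCart, List.range_succ]
  | cons m M ih =>
      intro hpos
      have hm : 0 < m := hpos m (List.mem_cons_self ..)
      have hP : 0 < M.prod := List.prod_pos (fun n hn => hpos n (List.mem_cons_of_mem _ hn))
      have htn : (m :: M).prod.toNat = m.toNat * M.prod.toNat := by
        rw [List.prod_cons, Int.toNat_mul (le_of_lt hm) (le_of_lt hP)]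
      rw [htn, pvRange_mul, List.map_flatMap]
      simp only [pvCart, List.flatMap_map]
      rw [← ih (fun n hn => hpos n (List.mem_cons_of_mem _ hn))]
      apply List.flatMap_congr  -- pointwise over k ∈ range m.toNat
      intro k hk
      rw [List.map_map, List.map_map]
      apply List.map_congr_left
      intro r hr
      simp only [Function.comp_apply]
      have hk' : (k : Int) < m := by
        rw [List.mem_range] at hk
        omega
      have hr0 : (0 : Int) ≤ (r : Int) := Int.natCast_nonneg r
      have hr1 : (r : Int) < M.prod := by
        rw [List.mem_range] at hr
        omega
      have hcast : ((k * M.prod.toNat + r : Nat) : Int) = (k : Int) * M.prod + (r : Int) := by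
        push_cast
        rw [Int.toNat_of_nonneg (le_of_lt hP)]
      rw [hcast]
      rw [pvSt_cons, pvSt_decomp M (fun n hn => hpos n (List.mem_cons_of_mem _ hn)) _ _ hr0 hr1]
      have hq3 : PySem.Int.floordiv (k : Int) m = 0 := by
        rw [PySem.Int.floordiv_eq_iff_of_pos hm]
        constructor <;> nlinarith [Int.natCast_nonneg k]
      have hq4 : PySem.Int.mod (k : Int) m = (k : Int) := by
        have := PySem.Int.floordiv_mul_add_mod (k : Int) m
        rw [hq3] at this
        omega
      simp [hq4]

theorem pvTotal_pos : ∀ (M : List Int) (acc : Int), (∀ n ∈ M, 0 < n) →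
    pvTotal acc M = some (acc * M.prod) := by
  intro M
  induction M with
  | nil => intro acc _; simp [pvTotal]
  | cons m M ih =>
      intro acc hpos
      have hm : 0 < m := hpos m (List.mem_cons_self ..)
      rw [pvTotal, if_neg (by omega), ih _ (fun n hn => hpos n (List.mem_cons_of_mem _ hn))]
      rw [List.prod_cons]
      ring_nf

theorem pvTotal_none : ∀ (M : List Int) (acc : Int), (∃ n ∈ M, n ≤ 0) →
    pvTotal acc M = none := by
  intro M
  induction M with
  | nil => intro acc h; simp at h
  | cons m M ih =>
      intro acc h
      by_cases hm : m ≤ 0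
      · rw [pvTotal, if_pos hm]
      · rcases h with ⟨n, hn, hle⟩
        rcases List.mem_cons.mp hn with rfl | hn'
        · omega
        · rw [pvTotal, if_neg hm, ih _ ⟨n, hn', hle⟩]

theorem multi_index_alt_eq_cart (N : List Int) : multi_index_alt N = pvCart N := by
  by_cases h : ∃ n ∈ N, n ≤ 0
  · unfold multi_index_alt
    rw [pvTotal_none N 1 h, pvCart_nil_of_nonpos h]
  · push Not at h
    have hpos : ∀ n ∈ N, 0 < n := fun n hn => h n hn
    unfold multi_index_alt
    rw [pvTotal_pos N 1 hpos]
    simp only [one_mul]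
    have hP : 0 ≤ N.prod := by
      rcases N with - | ⟨m, M⟩
      · simp
      · exact le_of_lt (List.prod_pos hpos)
    rw [show N.prod = ((N.prod.toNat : Nat) : Int) by omega, PySem.List.pyRange_zero_natCast]
    rw [PySem.List.foldl_append_eq_flatMap]
    rw [← pvRows_eq_cart N hpos]
    simp [pvRow_eq_st, ← List.map_eq_flatMap]

-- ===== VERDICT (by name: the statement is the Claim_ definition above) =====
theorem multi_index_spec : Claim_equal_multi_index := by
  intro N _
  unfold Spec_multi_index
  rw [multi_index_eq_cart, multi_index_alt_eq_cart]
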